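-- pv_equiv track=rewrite | github.com/jmk9/mrta-charging-scheduling | scheduler/offline_charge_sequence_analyzer _modified.py | _event_charger_to_per_robot
-- ===== SOURCE A (Python) =====
-- from typing import Dict, List, Tuple, Optional
--
-- def _event_charger_to_per_robot(
--     event_charger_list: List[Tuple[str, int, int]],
-- ) -> Dict[str, List[int]]:
--     """(robot_id, task_idx, ch_idx) 리스트 → 로봇별 ch_idx 리스트 (충전 순서)."""
--     per: Dict[str, List[Tuple[int, int]]] = {}
--     for rid, task_idx, ch_idx in event_charger_list:
--         per.setdefault(rid, []).append((task_idx, ch_idx))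
--     for rid in per:
--         per[rid].sort(key=lambda x: x[0])
--         per[rid] = [ch_idx for _, ch_idx in per[rid]]
--     return per
-- ===== SOURCE B (Python) =====
-- from typing import Dict, List, Tuple
--
--
-- def _event_charger_to_per_robot(
--     event_charger_list: List[Tuple[str, int, int]],
-- ) -> Dict[str, List[int]]:
--     per: Dict[str, List[int]] = {rid: [] for rid, _, _ in event_charger_list}
--     for rid, _, ch_idx in sorted(event_charger_list, key=lambda e: e[1]):
--         per[rid].append(ch_idx)
--     return per
-- ===== Notes on version B (the rewrite author's own statement) =====
-- stated objective: alternative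
-- what changed: One stable global sort keyed on task_idx followed by a single grouping pass replaces A's group-then-sort-each-group (and the per-group pair lists and second per-key rewrite loop disappear); equal because a stable global sort preserves original order within each robot's equal task_idx ties.
import Mathlib
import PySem

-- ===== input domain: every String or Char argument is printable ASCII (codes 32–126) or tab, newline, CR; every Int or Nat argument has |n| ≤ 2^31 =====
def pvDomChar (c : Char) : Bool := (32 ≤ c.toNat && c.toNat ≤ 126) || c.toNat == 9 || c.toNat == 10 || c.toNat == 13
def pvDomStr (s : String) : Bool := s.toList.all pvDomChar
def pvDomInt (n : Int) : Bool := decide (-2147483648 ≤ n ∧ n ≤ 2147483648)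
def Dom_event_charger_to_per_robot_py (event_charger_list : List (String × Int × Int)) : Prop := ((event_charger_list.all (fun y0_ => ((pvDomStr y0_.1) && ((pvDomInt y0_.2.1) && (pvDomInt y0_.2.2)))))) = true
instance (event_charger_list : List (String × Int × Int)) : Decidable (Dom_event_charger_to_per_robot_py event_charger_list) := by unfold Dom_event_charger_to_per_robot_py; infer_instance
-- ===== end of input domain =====

-- B replaces A's group-then-sort-each-group by one stable global sort on task_idx followed by a single
-- grouping pass (same cost, different decomposition); proved to return the same dict, key order included.


-- ===== PORT A =====
-- per.setdefault(rid, []).append((task_idx, ch_idx)) == per[rid] = per.get(rid, []) + [(task_idx, ch_idx)]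
-- (e.2 IS the pair (task_idx, ch_idx)); the second loop rewrites each value in place, leaving key order unchanged.
def event_charger_to_per_robot_py (event_charger_list : List (String × Int × Int)) : List (String × List Int) :=
  let per : PySem.Dict String (List (Int × Int)) :=
    event_charger_list.foldl (fun d e => d.modify e.1 [] (· ++ [e.2])) PySem.Dict.empty
  (per.items.map (fun kv => (kv.1, (PySem.List.sorted kv.2 (fun x => x.1) false).map (fun x => x.2))))

-- ===== PORT B =====
-- {rid: [] for rid, _, _ in l} then one pass over sorted(l, key=lambda e: e[1]) appending ch_idx.
def event_charger_to_per_robot_py_alt (event_charger_list : List (String × Int × Int)) : List (String × List Int) :=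
  let per0 : PySem.Dict String (List Int) :=
    event_charger_list.foldl (fun d e => d.insert e.1 []) PySem.Dict.empty
  let per : PySem.Dict String (List Int) :=
    (PySem.List.sorted event_charger_list (fun e => e.2.1) false).foldl
      (fun d e => d.modify e.1 [] (· ++ [e.2.2])) per0
  per.items

-- ===== PRECONDITION & SPEC =====
def Spec_event_charger_to_per_robot_py (event_charger_list : List (String × Int × Int)) (out : List (String × List Int)) : Prop := out = event_charger_to_per_robot_py_alt event_charger_list
instance (event_charger_list : List (String × Int × Int)) (out : List (String × List Int)) : Decidable (Spec_event_charger_to_per_robot_py event_charger_list out) := by unfold Spec_event_charger_to_per_robot_py; infer_instance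

-- ===== CLAIM (what is proved, stated in full; the proofs are below) =====
def Claim_equal_event_charger_to_per_robot_py : Prop := ∀ (event_charger_list : List (String × Int × Int)), Dom_event_charger_to_per_robot_py event_charger_list → Spec_event_charger_to_per_robot_py event_charger_list (event_charger_to_per_robot_py event_charger_list)

-- ===== LEMMAS AND PROOFS =====

-- inserting a mapped element into a mapped list
theorem pv_insertBy_map {α β : Type} (f : α → β) (before : β → β → Bool) (x : α) (ys : List α) :
    PySem.List.insertBy before (f x) (ys.map f)
      = (PySem.List.insertBy (fun a b => before (f a) (f b)) x ys).map f := by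
  induction ys with
  | nil => simp [PySem.List.insertBy]
  | cons y ys ih =>
    simp only [List.map_cons, PySem.List.insertBy]
    by_cases h : before (f x) (f y) = true
    · simp [h]
    · simp [h, ih]

-- sorted of a mapped list, with the key composed through the map
theorem pv_sorted_map {α β : Type} (xs : List α) (f : α → β) (k : β → Int) :
    PySem.List.sorted (xs.map f) k false
      = (PySem.List.sorted xs (fun a => k (f a)) false).map f := by
  induction xs using List.reverseRecOn with
  | nil => simp [PySem.List.sorted_eq_foldl_insertBy]
  | append_singleton xs x ih =>
    simp only [List.map_append, List.map_cons, List.map_nil,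
      PySem.List.sorted_eq_foldl_insertBy, List.foldl_append, List.foldl_cons, List.foldl_nil] at *
    rw [ih, pv_insertBy_map]

theorem pv_insertBy_of_forall_before {α : Type} (before : α → α → Bool) (x : α) (zs : List α)
    (h : ∀ z ∈ zs, before x z = true) :
    PySem.List.insertBy before x zs = x :: zs := by
  cases zs with
  | nil => simp [PySem.List.insertBy]
  | cons z zs => simp [PySem.List.insertBy, h z (by simp)]

-- filter commutes with insertBy when being-before-x is downward closed along the list
theorem pv_filter_insertBy {α : Type} (before : α → α → Bool) (p : α → Bool) (x : α) (ys : List α)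
    (hmono : ys.Pairwise (fun a b => before x a = true → before x b = true)) :
    (PySem.List.insertBy before x ys).filter p
      = if p x then PySem.List.insertBy before x (ys.filter p) else ys.filter p := by
  induction ys with
  | nil => by_cases hx : p x = true <;> simp [PySem.List.insertBy, hx]
  | cons y ys ih =>
    have hy := (List.pairwise_cons.mp hmono).1
    have hys := (List.pairwise_cons.mp hmono).2
    simp only [PySem.List.insertBy]
    by_cases hxy : before x y = true
    · simp only [hxy, if_pos]
      by_cases hx : p x = true
      · rw [if_pos hx, List.filter_cons, if_pos hx]
        rw [pv_insertBy_of_forall_before before x ((y :: ys).filter p)]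
        intro z hz
        rcases List.mem_cons.mp (List.mem_of_mem_filter hz) with h | h
        · exact h ▸ hxy
        · exact hy z h hxy
      · simp [hx]
    · simp only [hxy, if_neg, Bool.false_eq_true, not_false_iff]
      by_cases hx : p x = true
      · rw [if_pos hx]
        by_cases hpy : p y = true
        · simp only [List.filter_cons, hpy, if_pos, PySem.List.insertBy, hxy]
          simp [ih hys, hx]
        · simp [hpy, ih hys, hx]
      · rw [if_neg hx]
        by_cases hpy : p y = true <;> simp [hpy, ih hys, hx]

-- a stable sort commutes with filtering
theorem pv_sorted_filter {α : Type} (xs : List α) (k : α → Int) (p : α → Bool) :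
    (PySem.List.sorted xs k false).filter p = PySem.List.sorted (xs.filter p) k false := by
  induction xs using List.reverseRecOn with
  | nil => simp [PySem.List.sorted_eq_foldl_insertBy]
  | append_singleton xs x ih =>
    have hpw : (PySem.List.sorted xs k false).Pairwise
        (fun a b => decide (k x < k a) = true → decide (k x < k b) = true) := by
      refine (PySem.List.sorted_pairwise (xs := xs) (key := k)).imp ?_
      intro a b hab h
      simp only [decide_eq_true_eq] at *
      omega
    rw [List.filter_append, PySem.List.sorted_eq_foldl_insertBy, List.foldl_append,
      List.foldl_cons, List.foldl_nil, ← PySem.List.sorted_eq_foldl_insertBy,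
      pv_filter_insertBy _ p x _ hpw, ih]
    by_cases hx : p x = true
    · simp only [List.filter_cons, hx, if_pos, List.filter_nil]
      rw [PySem.List.sorted_eq_foldl_insertBy (xs := xs.filter p ++ [x]), List.foldl_append,
        List.foldl_cons, List.foldl_nil, ← PySem.List.sorted_eq_foldl_insertBy]
    · simp [hx]

-- B's seeding loop gives every key the value []
theorem pv_getD_seed (l : List (String × Int × Int)) (d : PySem.Dict String (List Int))
    (h : ∀ c, d.getD c [] = []) (c : String) :
    (l.foldl (fun d e => d.insert e.1 ([] : List Int)) d).getD c [] = [] := by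
  induction l generalizing d with
  | nil => exact h c
  | cons e l ih =>
    simp only [List.foldl_cons]
    refine ih _ ?_
    intro c'
    rw [PySem.Dict.getD_insert]
    split_ifs with h' <;> simp [h]

-- ===== VERDICT (by name: the statement is the Claim_ definition above) =====
theorem event_charger_to_per_robot_py_spec : Claim_equal_event_charger_to_per_robot_py := by
  intro l _
  simp only [Spec_event_charger_to_per_robot_py, event_charger_to_per_robot_py,
    event_charger_to_per_robot_py_alt]
  -- A's grouping dict and B's two dicts
  set perA : PySem.Dict String (List (Int × Int)) :=
    l.foldl (fun d e => d.modify e.1 [] (· ++ [e.2])) PySem.Dict.empty with hperA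
  set per0 : PySem.Dict String (List Int) :=
    l.foldl (fun d e => d.insert e.1 []) PySem.Dict.empty with hper0
  set sl := PySem.List.sorted l (fun e => e.2.1) false with hsl
  set perB : PySem.Dict String (List Int) :=
    sl.foldl (fun d e => d.modify e.1 [] (· ++ [e.2.2])) per0 with hperB
  have hndA : perA.keys.Nodup := by
    rw [hperA]
    exact PySem.Dict.nodup_keys_foldl_modify_key _ _ _ _ _ PySem.Dict.nodup_keys_empty
  have hnd0 : per0.keys.Nodup := by
    rw [hper0]
    exact PySem.Dict.nodup_keys_foldl_insert_key _ _ _ _ PySem.Dict.nodup_keys_empty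
  have hndB : perB.keys.Nodup := by
    rw [hperB]
    exact PySem.Dict.nodup_keys_foldl_modify_key _ _ _ _ _ hnd0
  have hkA : perA.keys = PySem.Set.update [] (l.map (fun e => e.1)) := by
    rw [hperA, PySem.Dict.keys_foldl_modify_key, PySem.Dict.keys_empty]
  have hk0 : per0.keys = PySem.Set.update [] (l.map (fun e => e.1)) := by
    rw [hper0, PySem.Dict.keys_foldl_insert_key, PySem.Dict.keys_empty]
  have hkB : perB.keys = perA.keys := by
    rw [hperB, PySem.Dict.keys_foldl_modify_key, hk0, hkA,
      PySem.Set.update_eq_append_filter]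
    have : ((PySem.Set.ofList (sl.map (fun e => e.1))).filter
        (fun y => !(PySem.Set.contains (PySem.Set.update [] (l.map (fun e => e.1))) y))) = [] := by
      rw [List.filter_eq_nil_iff]
      intro y hy
      have hy' : y ∈ sl.map (fun e => e.1) := by simpa [PySem.Set.mem_ofList] using hy
      have hperm := PySem.List.sorted_perm (xs := l) (key := fun e => e.2.1) (rev := false)
      have hyl : y ∈ l.map (fun e => e.1) :=
        ((hperm.map (fun e => e.1)).mem_iff).mp (by simpa [hsl] using hy')
      simp [PySem.Set.mem_update, hyl]
    rw [this, List.append_nil]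
  -- values
  have hvA : ∀ c, perA.getD c [] = (l.filter (fun e => e.1 == c)).map (fun e => e.2) := by
    intro c
    rw [hperA, PySem.Dict.getD_foldl_modify_append, PySem.Dict.getD_empty, List.nil_append]
  have hvB : ∀ c, perB.getD c [] =
      (sl.filter (fun e => e.1 == c)).map (fun e => e.2.2) := by
    intro c
    have h0 : per0.getD c [] = [] := by
      rw [hper0]
      exact pv_getD_seed l PySem.Dict.empty (fun c => PySem.Dict.getD_empty c []) c
    have : perB = (sl.map (fun e => (e.1, e.2.2))).foldl
        (fun d p => d.modify p.1 [] (· ++ [p.2])) per0 := by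
      rw [hperB, List.foldl_map]
    rw [this, PySem.Dict.getD_foldl_modify_append, h0, List.nil_append, List.filter_map,
      List.map_map]
    rfl
  -- assemble
  rw [PySem.Dict.items_eq_map_keys perA hndA [], PySem.Dict.items_eq_map_keys perB hndB [],
    hkB, List.map_map]
  refine List.map_congr_left ?_
  intro c _
  simp only [Function.comp]
  rw [hvA, hvB, pv_sorted_filter l (fun e => e.2.1) (fun e => e.1 == c)]
  rw [pv_sorted_map (l.filter (fun e => e.1 == c)) (fun e => e.2) (fun x => x.1), List.map_map]
  rfl
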